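-- pv_equiv track=rewrite | github.com/Newsujin/Algorithm | 백준/Gold/18428. 감시 피하기/감시 피하기.py | can_avoid_detection
-- ===== SOURCE A (Python) =====
-- def can_avoid_detection(board, teachers, n):
--     for tx, ty in teachers:
--         for dx, dy in [(-1, 0), (1, 0), (0, -1), (0, 1)]:
--             nx, ny = tx, ty
--             while 0 <= nx < n and 0 <= ny < n:
--                 if board[nx][ny] == 'O':
--                     break
--                 if board[nx][ny] == 'S':
--                     return False
--                 nx += dx
--                 ny += dy
--     return True
-- ===== SOURCE B (Python) =====
-- def can_avoid_detection(board, teachers, n):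
--     # Pass 1: mark every cell watched by some teacher; Pass 2: scan the board for a watched 'S'.
--     watched = set()
--     for tx, ty in teachers:
--         for dx, dy in ((-1, 0), (1, 0), (0, -1), (0, 1)):
--             x, y = tx, ty
--             while 0 <= x < n and 0 <= y < n:
--                 if board[x][y] == 'O':
--                     break
--                 watched.add((x, y))
--                 x += dx
--                 y += dy
--     for i in range(n):
--         for j in range(n):
--             if board[i][j] == 'S' and (i, j) in watched:
--                 return False
--     return True
-- ===== Notes on version B (the rewrite author's own statement) =====
-- stated objective: alternative
-- what changed: B decouples the fused detect-while-walking scan into two passes: first it builds a 'watched' set of all cells visible to any teacher (stopping rays at obstacles), then it scans the whole board and reports failure iff some 'S' cell is watched.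
-- outside the precondition, e.g. on can_avoid_detection([], [], 1): A returns True, B raises IndexError
import Mathlib
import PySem

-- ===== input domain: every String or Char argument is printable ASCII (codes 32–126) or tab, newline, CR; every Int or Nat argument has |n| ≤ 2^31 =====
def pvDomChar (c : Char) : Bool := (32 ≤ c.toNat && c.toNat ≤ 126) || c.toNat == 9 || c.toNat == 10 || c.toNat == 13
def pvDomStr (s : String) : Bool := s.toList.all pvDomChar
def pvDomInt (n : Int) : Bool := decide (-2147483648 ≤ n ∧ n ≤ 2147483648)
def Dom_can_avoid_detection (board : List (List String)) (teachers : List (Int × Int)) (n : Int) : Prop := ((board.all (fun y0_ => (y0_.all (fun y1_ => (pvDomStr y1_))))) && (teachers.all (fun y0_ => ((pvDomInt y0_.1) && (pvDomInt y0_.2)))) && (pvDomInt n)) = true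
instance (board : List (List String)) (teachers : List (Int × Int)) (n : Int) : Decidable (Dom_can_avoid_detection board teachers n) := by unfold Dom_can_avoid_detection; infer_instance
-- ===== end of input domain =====

-- B changes the decomposition: it first builds the set of all teacher-watched cells, then scans the board for a watched 'S' (alternative, not faster).

-- ===== PORT A =====
-- board[i][j]; total via defaults — Pre_ guarantees the accesses are in range, matching Python.
def pvCell (board : List (List String)) (i j : Int) : String :=
  PySem.List.pyGetD (PySem.List.pyGetD board i []) j ""

-- A's inner while loop: walk from (x,y) in direction (dx,dy); false = "return False" (saw 'S').
-- Fuel n.toNat+1 always suffices: each step moves one coordinate by ±1, leaving [0,n) after ≤ n steps.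
def pvRayA (board : List (List String)) (n dx dy : Int) : Nat → Int → Int → Bool
  | 0, _, _ => true
  | fuel + 1, x, y =>
    if 0 ≤ x ∧ x < n ∧ 0 ≤ y ∧ y < n then
      if pvCell board x y = "O" then true
      else if pvCell board x y = "S" then false
      else pvRayA board n dx dy fuel (x + dx) (y + dy)
    else true

def can_avoid_detection (board : List (List String)) (teachers : List (Int × Int)) (n : Int) : Bool :=
  teachers.all (fun t =>
    [((-1 : Int), (0 : Int)), (1, 0), (0, -1), (0, 1)].all (fun d =>
      pvRayA board n d.1 d.2 (n.toNat + 1) t.1 t.2))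

-- ===== PORT B =====
-- Pass 1 helper: add every cell on the ray (stopping at 'O' or the border) to the watched set.
def pvWatchRay (board : List (List String)) (n dx dy : Int) :
    Nat → Int → Int → PySem.Set (Int × Int) → PySem.Set (Int × Int)
  | 0, _, _, acc => acc
  | fuel + 1, x, y, acc =>
    if 0 ≤ x ∧ x < n ∧ 0 ≤ y ∧ y < n then
      if pvCell board x y = "O" then acc
      else pvWatchRay board n dx dy fuel (x + dx) (y + dy) (PySem.Set.add acc (x, y))
    else acc

def pvWatched (board : List (List String)) (teachers : List (Int × Int)) (n : Int) :
    PySem.Set (Int × Int) :=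
  teachers.foldl (fun acc t =>
    [((-1 : Int), (0 : Int)), (1, 0), (0, -1), (0, 1)].foldl (fun acc d =>
      pvWatchRay board n d.1 d.2 (n.toNat + 1) t.1 t.2 acc) acc) PySem.Set.empty

def can_avoid_detection_alt (board : List (List String)) (teachers : List (Int × Int)) (n : Int) : Bool :=
  let watched := pvWatched board teachers n
  !((PySem.List.pyRange 0 n 1).any (fun i =>
      (PySem.List.pyRange 0 n 1).any (fun j =>
        pvCell board i j == "S" && watched.contains (i, j))))

-- ===== PRECONDITION & SPEC =====
-- Pre_ excludes exactly the malformed grids on which Python A can raise IndexError (board with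
-- fewer than n rows or a row shorter than n); A happens to return on a few such boards when no
-- teacher ray ever reaches the missing cells (e.g. ([], [], 1)), and those are excluded too.
def Pre_can_avoid_detection (board : List (List String)) (teachers : List (Int × Int)) (n : Int) : Prop :=
  n ≤ (board.length : Int) ∧ ∀ row ∈ board, n ≤ (row.length : Int)
instance (board : List (List String)) (teachers : List (Int × Int)) (n : Int) : Decidable (Pre_can_avoid_detection board teachers n) := by unfold Pre_can_avoid_detection; infer_instance

def pvWitness_can_avoid_detection : List (List String) × (List (Int × Int)) × Int :=
  ([["T", "X"], ["X", "S"]], [(0, 0)], 2)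

def Spec_can_avoid_detection (board : List (List String)) (teachers : List (Int × Int)) (n : Int) (out : Bool) : Prop := out = can_avoid_detection_alt board teachers n
instance (board : List (List String)) (teachers : List (Int × Int)) (n : Int) (out : Bool) : Decidable (Spec_can_avoid_detection board teachers n out) := by unfold Spec_can_avoid_detection; infer_instance

-- ===== CLAIM (what is proved, stated in full; the proofs are below) =====
def Claim_equal_can_avoid_detection : Prop := ∀ (board : List (List String)) (teachers : List (Int × Int)) (n : Int), Dom_can_avoid_detection board teachers n → Pre_can_avoid_detection board teachers n → Spec_can_avoid_detection board teachers n (can_avoid_detection board teachers n)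

-- ===== LEMMAS AND PROOFS =====

-- The cells a ray visits (stopping at 'O' or the border), as a plain list.
def pvRayCells (board : List (List String)) (n dx dy : Int) : Nat → Int → Int → List (Int × Int)
  | 0, _, _ => []
  | fuel + 1, x, y =>
    if 0 ≤ x ∧ x < n ∧ 0 ≤ y ∧ y < n then
      if pvCell board x y = "O" then []
      else (x, y) :: pvRayCells board n dx dy fuel (x + dx) (y + dy)
    else []

theorem mem_watchRay (board : List (List String)) (n dx dy : Int) :
    ∀ (fuel : Nat) (x y : Int) (acc : PySem.Set (Int × Int)) (p : Int × Int),
      p ∈ pvWatchRay board n dx dy fuel x y acc ↔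
        p ∈ acc ∨ p ∈ pvRayCells board n dx dy fuel x y := by
  intro fuel
  induction fuel with
  | zero => intro x y acc p; simp [pvWatchRay, pvRayCells]
  | succ f ih =>
    intro x y acc p
    simp only [pvWatchRay, pvRayCells]
    split_ifs with h1 h2
    · simp
    · rw [ih]
      simp [PySem.Set.mem_add]
      tauto
    · simp

theorem rayA_eq_false_iff (board : List (List String)) (n dx dy : Int) :
    ∀ (fuel : Nat) (x y : Int),
      pvRayA board n dx dy fuel x y = false ↔
        ∃ p ∈ pvRayCells board n dx dy fuel x y, pvCell board p.1 p.2 = "S" := by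
  intro fuel
  induction fuel with
  | zero => intro x y; simp [pvRayA, pvRayCells]
  | succ f ih =>
    intro x y
    simp only [pvRayA, pvRayCells]
    split_ifs with h1 h2 h3
    · simp
    · simp [h3]
    · rw [ih]
      simp
      intro hS
      exact absurd hS h3
    · simp

theorem rayCells_bounds (board : List (List String)) (n dx dy : Int) :
    ∀ (fuel : Nat) (x y : Int) (p : Int × Int),
      p ∈ pvRayCells board n dx dy fuel x y →
        0 ≤ p.1 ∧ p.1 < n ∧ 0 ≤ p.2 ∧ p.2 < n := by
  intro fuel
  induction fuel with
  | zero => intro x y p hp; simp [pvRayCells] at hp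
  | succ f ih =>
    intro x y p hp
    simp only [pvRayCells] at hp
    split_ifs at hp with h1 h2
    · simp at hp
    · rcases List.mem_cons.mp hp with rfl | hp'
      · exact h1
      · exact ih _ _ _ hp'
    · simp at hp

theorem mem_watched (board : List (List String)) (teachers : List (Int × Int)) (n : Int)
    (p : Int × Int) :
    p ∈ pvWatched board teachers n ↔
      ∃ t ∈ teachers, ∃ d ∈ [((-1 : Int), (0 : Int)), (1, 0), (0, -1), (0, 1)],
        p ∈ pvRayCells board n d.1 d.2 (n.toNat + 1) t.1 t.2 := by
  have inner : ∀ (t : Int × Int) (acc : PySem.Set (Int × Int)),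
      (p ∈ [((-1 : Int), (0 : Int)), (1, 0), (0, -1), (0, 1)].foldl (fun acc d =>
          pvWatchRay board n d.1 d.2 (n.toNat + 1) t.1 t.2 acc) acc ↔
        p ∈ acc ∨ ∃ d ∈ [((-1 : Int), (0 : Int)), (1, 0), (0, -1), (0, 1)],
          p ∈ pvRayCells board n d.1 d.2 (n.toNat + 1) t.1 t.2) := by
    intro t acc
    simp only [List.foldl_cons, List.foldl_nil, mem_watchRay, List.mem_cons, List.not_mem_nil]
    aesop
  have main : ∀ (ts : List (Int × Int)) (acc : PySem.Set (Int × Int)),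
      (p ∈ ts.foldl (fun acc t =>
          [((-1 : Int), (0 : Int)), (1, 0), (0, -1), (0, 1)].foldl (fun acc d =>
            pvWatchRay board n d.1 d.2 (n.toNat + 1) t.1 t.2 acc) acc) acc ↔
        p ∈ acc ∨ ∃ t ∈ ts, ∃ d ∈ [((-1 : Int), (0 : Int)), (1, 0), (0, -1), (0, 1)],
          p ∈ pvRayCells board n d.1 d.2 (n.toNat + 1) t.1 t.2) := by
    intro ts
    induction ts with
    | nil => intro acc; simp
    | cons t ts ih =>
      intro acc
      rw [List.foldl_cons, ih, inner]
      simp only [List.mem_cons]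
      constructor
      · rintro ((h | h) | h)
        · exact Or.inl h
        · exact Or.inr ⟨t, Or.inl rfl, h⟩
        · rcases h with ⟨t', ht', hd⟩; exact Or.inr ⟨t', Or.inr ht', hd⟩
      · rintro (h | ⟨t', (rfl | ht'), hd⟩)
        · exact Or.inl (Or.inl h)
        · exact Or.inl (Or.inr hd)
        · exact Or.inr ⟨t', ht', hd⟩
  have := main teachers PySem.Set.empty
  simpa [pvWatched, PySem.Set.empty] using this

theorem a_false_iff (board : List (List String)) (teachers : List (Int × Int)) (n : Int) :
    can_avoid_detection board teachers n = false ↔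
      ∃ t ∈ teachers, ∃ d ∈ [((-1 : Int), (0 : Int)), (1, 0), (0, -1), (0, 1)],
        ∃ p ∈ pvRayCells board n d.1 d.2 (n.toNat + 1) t.1 t.2, pvCell board p.1 p.2 = "S" := by
  simp only [can_avoid_detection, List.all_eq_false]
  constructor
  · rintro ⟨t, ht, hall⟩
    rw [Bool.not_eq_true, List.all_eq_false] at hall
    rcases hall with ⟨d, hd, hray⟩
    rw [Bool.not_eq_true, rayA_eq_false_iff] at hray
    exact ⟨t, ht, d, hd, hray⟩
  · rintro ⟨t, ht, d, hd, hS⟩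
    refine ⟨t, ?_⟩
    rw [Bool.not_eq_true, List.all_eq_false]
    refine ⟨ht, d, hd, ?_⟩
    rw [Bool.not_eq_true, rayA_eq_false_iff]
    exact hS

theorem b_false_iff (board : List (List String)) (teachers : List (Int × Int)) (n : Int) :
    can_avoid_detection_alt board teachers n = false ↔
      ∃ p ∈ pvWatched board teachers n,
        (0 ≤ p.1 ∧ p.1 < n ∧ 0 ≤ p.2 ∧ p.2 < n) ∧ pvCell board p.1 p.2 = "S" := by
  simp only [can_avoid_detection_alt, Bool.not_eq_false', List.any_eq_true,
    Bool.and_eq_true, beq_iff_eq, PySem.List.mem_pyRange_one]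
  constructor
  · rintro ⟨i, ⟨hi0, hin⟩, j, ⟨hj0, hjn⟩, hS, hmem⟩
    exact ⟨(i, j), List.contains_iff_mem.mp hmem, ⟨hi0, hin, hj0, hjn⟩, hS⟩
  · rintro ⟨⟨i, j⟩, hmem, ⟨hi0, hin, hj0, hjn⟩, hS⟩
    exact ⟨i, ⟨hi0, hin⟩, j, ⟨hj0, hjn⟩, hS, List.contains_iff_mem.mpr hmem⟩

-- ===== VERDICT (by name: the statement is the Claim_ definition above) =====
theorem can_avoid_detection_spec : Claim_equal_can_avoid_detection := by
  intro board teachers n _ _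
  unfold Spec_can_avoid_detection
  have key : can_avoid_detection board teachers n = false ↔
      can_avoid_detection_alt board teachers n = false := by
    rw [a_false_iff, b_false_iff]
    constructor
    · rintro ⟨t, ht, d, hd, p, hp, hS⟩
      refine ⟨p, ?_, rayCells_bounds board n d.1 d.2 _ _ _ p hp, hS⟩
      rw [mem_watched]
      exact ⟨t, ht, d, hd, hp⟩
    · rintro ⟨p, hmem, _, hS⟩
      rw [mem_watched] at hmem
      rcases hmem with ⟨t, ht, d, hd, hp⟩
      exact ⟨t, ht, d, hd, p, hp, hS⟩
  cases hA : can_avoid_detection board teachers n <;>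
    cases hB : can_avoid_detection_alt board teachers n <;> simp_all
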